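-- pv_equiv track=rewrite | github.com/snydcol/NYTPuzzleSolvers | letter_boxed.py | two_word_solutions
-- ===== SOURCE A (Python) =====
-- def two_word_solutions(word_list, letter_list):
-- 	"""Function returns all possible two word solutions to LetterBoxed."""
-- 	valid_solutions =[]
--
-- 	for word in word_list:
-- 		matches = [w for w in word_list if w[0] == word[-1] and w!= word]
-- 		for match in matches:
-- 			if(set(word+match) == set(letter_list)):
-- 				valid_solutions.append([word, match])
-- 	return valid_solutions
-- ===== SOURCE B (Python) =====
-- def two_word_solutions(word_list, letter_list):
--     """Function returns all possible two word solutions to LetterBoxed."""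
--     target = set(letter_list)
--     index = {}
--     for w in word_list:
--         index.setdefault(w[0], []).append(w)
--     sets = {w: set(w) for w in word_list}
--     valid_solutions = []
--     for word in word_list:
--         wset = sets[word]
--         for match in index.get(word[-1], []):
--             if match != word and wset | sets[match] == target:
--                 valid_solutions.append([word, match])
--     return valid_solutions
-- ===== Notes on version B (the rewrite author's own statement) =====
-- stated objective: faster
-- what changed: B builds a dict index of words keyed by first letter and a per-word letter-set table once, then only scans the candidate bucket for each word instead of rescanning the whole word list and recomputing character sets per pair.
import Mathlib
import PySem

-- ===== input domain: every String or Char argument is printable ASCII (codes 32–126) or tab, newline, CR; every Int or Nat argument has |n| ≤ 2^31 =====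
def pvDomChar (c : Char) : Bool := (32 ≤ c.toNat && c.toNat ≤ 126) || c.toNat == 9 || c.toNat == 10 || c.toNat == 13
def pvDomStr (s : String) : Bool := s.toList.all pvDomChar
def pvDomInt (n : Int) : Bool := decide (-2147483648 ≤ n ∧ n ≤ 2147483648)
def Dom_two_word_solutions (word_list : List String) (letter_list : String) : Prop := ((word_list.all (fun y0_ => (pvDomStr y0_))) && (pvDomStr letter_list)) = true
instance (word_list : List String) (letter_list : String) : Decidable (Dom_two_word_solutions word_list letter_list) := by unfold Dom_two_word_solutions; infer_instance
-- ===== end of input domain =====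

-- B replaces A's quadratic rescan with a first-letter dict index and precomputed per-word letter sets (objective: faster).

-- ===== PORT A =====
-- 'set(word+match) == set(letter_list)' ported with PySem.Set (string concat as toList ++ toList)
def two_word_solutions (word_list : List String) (letter_list : String) : List (List String) :=
  word_list.foldl (fun valid_solutions word =>
    let matchesL := word_list.filter (fun w =>
      (PySem.Str.pyGet? w 0 == PySem.Str.pyGet? word (-1)) && w != word)
    matchesL.foldl (fun vs m =>
      if PySem.Set.equal (PySem.Set.ofList (word.toList ++ m.toList))
                         (PySem.Set.ofList letter_list.toList) then
        vs ++ [[word, m]]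
      else vs) valid_solutions) []

-- ===== PORT B =====
-- index.setdefault(w[0], []).append(w): key w[0] ported as Option Char (none = empty word, where Python raises; excluded by Pre_)
def pvIndexB (word_list : List String) : PySem.Dict (Option Char) (List String) :=
  word_list.foldl (fun d w => d.modify (PySem.Str.pyGet? w 0) [] (· ++ [w])) PySem.Dict.empty

-- sets = {w: set(w) for w in word_list}
def pvSetsB (word_list : List String) : PySem.Dict String (PySem.Set Char) :=
  word_list.foldl (fun d w => d.insert w (PySem.Set.ofList w.toList)) PySem.Dict.empty

-- sets[match] always hits (match ∈ word_list), so the getD default is never read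
def two_word_solutions_alt (word_list : List String) (letter_list : String) : List (List String) :=
  let target := PySem.Set.ofList letter_list.toList
  let index := pvIndexB word_list
  let sets := pvSetsB word_list
  word_list.foldl (fun valid_solutions word =>
    let wset := sets.getD word PySem.Set.empty
    (index.getD (PySem.Str.pyGet? word (-1)) []).foldl (fun vs m =>
      if (m != word) && PySem.Set.equal (PySem.Set.union wset (sets.getD m PySem.Set.empty)) target then
        vs ++ [[word, m]]
      else vs) valid_solutions) []

-- ===== PRECONDITION & SPEC =====
-- A (and B) raise IndexError on w[0]/word[-1] when word_list contains an empty string; exactly those inputs are excluded.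
def Pre_two_word_solutions (word_list : List String) (letter_list : String) : Prop :=
  "" ∉ word_list
instance (word_list : List String) (letter_list : String) : Decidable (Pre_two_word_solutions word_list letter_list) := by unfold Pre_two_word_solutions; infer_instance

def pvWitness_two_word_solutions : List String × String := (["ab", "ba"], "ab")

def Spec_two_word_solutions (word_list : List String) (letter_list : String) (out : List (List String)) : Prop := out = two_word_solutions_alt word_list letter_list
instance (word_list : List String) (letter_list : String) (out : List (List String)) : Decidable (Spec_two_word_solutions word_list letter_list out) := by unfold Spec_two_word_solutions; infer_instance

-- ===== CLAIM (what is proved, stated in full; the proofs are below) =====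
def Claim_equal_two_word_solutions : Prop := ∀ (word_list : List String) (letter_list : String), Dom_two_word_solutions word_list letter_list → Pre_two_word_solutions word_list letter_list → Spec_two_word_solutions word_list letter_list (two_word_solutions word_list letter_list)

-- ===== LEMMAS AND PROOFS =====

-- the index bucket at key c is exactly the filter of word_list on first letter c
theorem pvIndexB_getD (word_list : List String) (c : Option Char) :
    (pvIndexB word_list).getD c [] = word_list.filter (fun w => PySem.Str.pyGet? w 0 == c) := by
  unfold pvIndexB
  have h := PySem.Dict.getD_foldl_modify_append
      (l := word_list.map (fun w => (PySem.Str.pyGet? w 0, w)))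
      (d := (PySem.Dict.empty : PySem.Dict (Option Char) (List String))) (c := c)
  simp [List.foldl_map, List.filter_map, Function.comp_def, List.map_map] at h
  simpa using h

-- the sets table: generalized invariant for the insert loop
theorem pvSetsB_getD_gen (l : List String) (d : PySem.Dict String (PySem.Set Char)) (w : String) :
    (l.foldl (fun d w => d.insert w (PySem.Set.ofList w.toList)) d).getD w PySem.Set.empty
      = if w ∈ l then PySem.Set.ofList w.toList else d.getD w PySem.Set.empty := by
  induction l generalizing d with
  | nil => simp
  | cons x xs ih =>
    simp only [List.foldl_cons, ih, PySem.Dict.getD_insert, List.mem_cons]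
    by_cases h1 : w ∈ xs <;> by_cases h2 : w = x <;> simp [h1, h2]

-- the sets table looks up to set(w) for every w ∈ word_list
theorem pvSetsB_getD (word_list : List String) (w : String) (hw : w ∈ word_list) :
    (pvSetsB word_list).getD w PySem.Set.empty = PySem.Set.ofList w.toList := by
  unfold pvSetsB
  rw [pvSetsB_getD_gen]
  simp [hw]

-- set(word+match) == set(letter_list) agrees with set(word) | set(match) == set(letter_list)
theorem pvCheck_eq (a b t : List Char) :
    PySem.Set.equal (PySem.Set.ofList (a ++ b)) (PySem.Set.ofList t)
      = PySem.Set.equal (PySem.Set.union (PySem.Set.ofList a) (PySem.Set.ofList b)) (PySem.Set.ofList t) := by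
  rw [Bool.eq_iff_iff, PySem.Set.equal_iff, PySem.Set.equal_iff]
  constructor <;> intro h x <;>
    simpa [PySem.Set.mem_union, PySem.Set.mem_ofList, List.mem_append, or_assoc] using h x

-- ===== VERDICT (by name: the statement is the Claim_ definition above) =====
theorem two_word_solutions_spec : Claim_equal_two_word_solutions := by
  intro word_list letter_list _ _
  unfold Spec_two_word_solutions two_word_solutions two_word_solutions_alt
  simp only []
  apply PySem.List.foldl_congr_mem
  intro acc word hword
  rw [PySem.List.foldl_append_if (p := fun m => PySem.Set.equal (PySem.Set.ofList (word.toList ++ m.toList)) (PySem.Set.ofList letter_list.toList)) (f := fun m => [word, m])]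
  rw [PySem.List.foldl_append_if (p := fun m => (m != word) && PySem.Set.equal (PySem.Set.union ((pvSetsB word_list).getD word PySem.Set.empty) ((pvSetsB word_list).getD m PySem.Set.empty)) (PySem.Set.ofList letter_list.toList)) (f := fun m => [word, m])]
  rw [pvIndexB_getD, List.filter_filter, List.filter_filter]
  congr 1
  apply congrArg
  apply List.filter_congr
  intro m hm
  rw [pvSetsB_getD word_list word hword, pvSetsB_getD word_list m hm, ← pvCheck_eq]
  simp only [Bool.and_comm, Bool.and_left_comm, Bool.and_assoc]
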